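-- pv_equiv track=rewrite | github.com/Talhaahmd/webpage_analysis | app.py | adjust_trait_values
-- ===== SOURCE A (Python) =====
-- def adjust_trait_values(responses):
--     traits = ['Openness', 'Conscientiousness', 'Extraversion', 'Agreeableness', 'Neuroticism']
--     values = [50, 50, 50, 50, 50]
--
--     if responses.get('q1') == 'no':
--         values[0] -= 10
--     if responses.get('q2') in ['family', 'money', 'friends']:
--         values[0] -= 10
--     if responses.get('q8') in ['very_low']:
--         values[0] -= 20
--     elif responses.get('q8') in ['low']:
--         values[0] -= 10
--     elif responses.get('q8') in ['high']:
--         values[0] += 10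
--     elif responses.get('q8') in ['very_high']:
--         values[0] += 20
--     if responses.get('q9') in ['very_low']:
--         values[0] -= 20
--     elif responses.get('q9') in ['low']:
--         values[0] -= 10
--     elif responses.get('q9') in ['high']:
--         values[0] += 10
--     elif responses.get('q9') in ['very_high']:
--         values[0] += 20
--
--     if responses.get('q3') in ['very_low']:
--         values[1] -= 20
--     elif responses.get('q3') in ['low']:
--         values[1] -= 10
--     elif responses.get('q3') in ['high']:
--         values[1] += 10
--     elif responses.get('q3') in ['very_high']:
--         values[1] += 20
--     if responses.get('q7') in ['very_low']:
--         values[1] -= 20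
--     elif responses.get('q7') in ['low']:
--         values[1] -= 10
--     elif responses.get('q7') in ['high']:
--         values[1] += 10
--     elif responses.get('q7') in ['very_high']:
--         values[1] += 20
--
--     if responses.get('q4') in ['very_low']:
--         values[2] -= 20
--     elif responses.get('q4') in ['low']:
--         values[2] -= 10
--     elif responses.get('q4') in ['high']:
--         values[2] += 10
--     elif responses.get('q4') in ['very_high']:
--         values[2] += 20
--     if responses.get('q5') in ['very_low']:
--         values[2] -= 20
--     elif responses.get('q5') in ['low']:
--         values[2] -= 10
--     elif responses.get('q5') in ['high']:
--         values[2] += 10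
--     elif responses.get('q5') in ['very_high']:
--         values[2] += 20
--     if responses.get('q6') in ['very_low']:
--         values[2] -= 20
--     elif responses.get('q6') in ['low']:
--         values[2] -= 10
--     elif responses.get('q6') in ['high']:
--         values[2] += 10
--     elif responses.get('q6') in ['very_high']:
--         values[2] += 20
--
--     if responses.get('q10') in ['very_low']:
--         values[3] -= 20
--     elif responses.get('q10') in ['low']:
--         values[3] -= 10
--     elif responses.get('q10') in ['high']:
--         values[3] += 10
--     elif responses.get('q10') in ['very_high']:
--         values[3] += 20
--     if responses.get('q11') in ['very_low']:
--         values[3] -= 20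
--     elif responses.get('q11') in ['low']:
--         values[3] -= 10
--     elif responses.get('q11') in ['high']:
--         values[3] += 10
--     elif responses.get('q11') in ['very_high']:
--         values[3] += 20
--
--     if responses.get('q12') in ['high']:
--         values[4] += 10
--     elif responses.get('q12') in ['very_high']:
--         values[4] += 20
--     if responses.get('q13') in ['high']:
--         values[4] += 10
--     elif responses.get('q13') in ['very_high']:
--         values[4] += 20
--
--     values = [max(0, min(100, v)) for v in values]
--
--     return traits, values
-- ===== SOURCE B (Python) =====
-- TRAIT = {'q8': 0, 'q9': 0, 'q3': 1, 'q7': 1, 'q4': 2, 'q5': 2, 'q6': 2,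
--          'q10': 3, 'q11': 3, 'q12': 4, 'q13': 4}
-- SCORE = {'very_low': -20, 'low': -10, 'high': 10, 'very_high': 20}
--
--
-- def contribution(key, value):
--     """Classify one response as (trait_index, delta), or None if it scores nothing."""
--     if key == 'q1':
--         return (0, -10) if value == 'no' else None
--     if key == 'q2':
--         return (0, -10) if value in ('family', 'money', 'friends') else None
--     idx = TRAIT.get(key)
--     if idx is None:
--         return None
--     s = SCORE.get(value, 0)
--     if idx == 4 and s < 0:
--         s = 0  # Neuroticism questions q12/q13 carry no penalties
--     return (idx, s)
--
--
-- def adjust_trait_values(responses):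
--     traits = ['Openness', 'Conscientiousness', 'Extraversion', 'Agreeableness', 'Neuroticism']
--     values = [50, 50, 50, 50, 50]
--     for key, value in responses.items():
--         c = contribution(key, value)
--         if c is not None:
--             values[c[0]] += c[1]
--     return traits, [max(0, min(100, v)) for v in values]
-- ===== Notes on version B (the rewrite author's own statement) =====
-- stated objective: alternative
-- what changed: Reverses the data flow: instead of A's 44 per-question if/elif branches querying the dict, B makes one pass over responses.items(), classifying each answer with a contribution(key, value) function into a (trait-index, delta) pair and accumulating, then clamps.
import Mathlib
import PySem

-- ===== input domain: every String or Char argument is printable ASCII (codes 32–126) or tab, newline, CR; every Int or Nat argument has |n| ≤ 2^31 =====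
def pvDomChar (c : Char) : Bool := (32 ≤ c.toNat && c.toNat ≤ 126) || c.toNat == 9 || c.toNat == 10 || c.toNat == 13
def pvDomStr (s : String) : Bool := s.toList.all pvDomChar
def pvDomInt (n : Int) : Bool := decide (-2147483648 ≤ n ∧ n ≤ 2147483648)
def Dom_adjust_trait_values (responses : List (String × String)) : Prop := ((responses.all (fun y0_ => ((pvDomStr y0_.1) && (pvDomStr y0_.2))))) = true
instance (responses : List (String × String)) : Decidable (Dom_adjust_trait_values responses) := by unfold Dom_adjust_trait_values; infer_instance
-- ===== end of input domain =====

-- B makes one pass over the responses, classifying each answer into a (trait, delta)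
-- contribution and accumulating, instead of A's fixed per-question if/elif chains; objective: alternative.

-- ===== PORT A =====
-- A mutates five slots of `values` in sequence; ported as five let-rebound variables.
def adjust_trait_values (responses : List (String × String)) : List String × List Int :=
  let traits := ["Openness", "Conscientiousness", "Extraversion", "Agreeableness", "Neuroticism"]
  let g := fun k => (PySem.Dict.mk responses).get? k
  let v0 : Int := 50; let v1 : Int := 50; let v2 : Int := 50; let v3 : Int := 50; let v4 : Int := 50
  let v0 := if g "q1" = some "no" then v0 - 10 else v0
  let v0 := if g "q2" ∈ [some "family", some "money", some "friends"] then v0 - 10 else v0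
  let v0 := if g "q8" ∈ [some "very_low"] then v0 - 20
            else if g "q8" ∈ [some "low"] then v0 - 10
            else if g "q8" ∈ [some "high"] then v0 + 10
            else if g "q8" ∈ [some "very_high"] then v0 + 20 else v0
  let v0 := if g "q9" ∈ [some "very_low"] then v0 - 20
            else if g "q9" ∈ [some "low"] then v0 - 10
            else if g "q9" ∈ [some "high"] then v0 + 10
            else if g "q9" ∈ [some "very_high"] then v0 + 20 else v0
  let v1 := if g "q3" ∈ [some "very_low"] then v1 - 20
            else if g "q3" ∈ [some "low"] then v1 - 10
            else if g "q3" ∈ [some "high"] then v1 + 10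
            else if g "q3" ∈ [some "very_high"] then v1 + 20 else v1
  let v1 := if g "q7" ∈ [some "very_low"] then v1 - 20
            else if g "q7" ∈ [some "low"] then v1 - 10
            else if g "q7" ∈ [some "high"] then v1 + 10
            else if g "q7" ∈ [some "very_high"] then v1 + 20 else v1
  let v2 := if g "q4" ∈ [some "very_low"] then v2 - 20
            else if g "q4" ∈ [some "low"] then v2 - 10
            else if g "q4" ∈ [some "high"] then v2 + 10
            else if g "q4" ∈ [some "very_high"] then v2 + 20 else v2
  let v2 := if g "q5" ∈ [some "very_low"] then v2 - 20
            else if g "q5" ∈ [some "low"] then v2 - 10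
            else if g "q5" ∈ [some "high"] then v2 + 10
            else if g "q5" ∈ [some "very_high"] then v2 + 20 else v2
  let v2 := if g "q6" ∈ [some "very_low"] then v2 - 20
            else if g "q6" ∈ [some "low"] then v2 - 10
            else if g "q6" ∈ [some "high"] then v2 + 10
            else if g "q6" ∈ [some "very_high"] then v2 + 20 else v2
  let v3 := if g "q10" ∈ [some "very_low"] then v3 - 20
            else if g "q10" ∈ [some "low"] then v3 - 10
            else if g "q10" ∈ [some "high"] then v3 + 10
            else if g "q10" ∈ [some "very_high"] then v3 + 20 else v3
  let v3 := if g "q11" ∈ [some "very_low"] then v3 - 20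
            else if g "q11" ∈ [some "low"] then v3 - 10
            else if g "q11" ∈ [some "high"] then v3 + 10
            else if g "q11" ∈ [some "very_high"] then v3 + 20 else v3
  let v4 := if g "q12" ∈ [some "high"] then v4 + 10
            else if g "q12" ∈ [some "very_high"] then v4 + 20 else v4
  let v4 := if g "q13" ∈ [some "high"] then v4 + 10
            else if g "q13" ∈ [some "very_high"] then v4 + 20 else v4
  let values := [v0, v1, v2, v3, v4].map (fun v => max 0 (min 100 v))
  (traits, values)

-- ===== PORT B =====
-- Source B's module-level tables TRAIT and SCORE
def pvTrait : PySem.Dict String Nat :=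
  PySem.Dict.mk [("q8", 0), ("q9", 0), ("q3", 1), ("q7", 1), ("q4", 2), ("q5", 2), ("q6", 2),
                 ("q10", 3), ("q11", 3), ("q12", 4), ("q13", 4)]
def pvScoreT : PySem.Dict String Int :=
  PySem.Dict.mk [("very_low", -20), ("low", -10), ("high", 10), ("very_high", 20)]

-- Source B's contribution(key, value); the trait indices it yields are the literals 0–4, hence Nat
def pvContribution (k v : String) : Option (Nat × Int) :=
  if k = "q1" then (if v = "no" then some (0, -10) else none)
  else if k = "q2" then (if v ∈ ["family", "money", "friends"] then some (0, -10) else none)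
  else
    match pvTrait.get? k with
    | none => none
    | some idx =>
      let s := pvScoreT.getD v 0
      some (idx, if idx = 4 ∧ s < 0 then 0 else s)

-- responses.items(): the entries visible under the dict-as-assoc-list convention
-- (first binding per key), in insertion order; `seen` accumulates the keys already emitted
def pvItemsGo : List (String × String) → List String → List (String × String)
  | [], _ => []
  | p :: t, seen => if p.1 ∈ seen then pvItemsGo t seen else p :: pvItemsGo t (p.1 :: seen)

def pvItems (l : List (String × String)) : List (String × String) := pvItemsGo l []

def adjust_trait_values_alt (responses : List (String × String)) : List String × List Int :=
  let traits := ["Openness", "Conscientiousness", "Extraversion", "Agreeableness", "Neuroticism"]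
  let values : List Int := [50, 50, 50, 50, 50]
  let values := (pvItems responses).foldl
    (fun vs p =>
      match pvContribution p.1 p.2 with
      | none => vs
      | some c => vs.set c.1 (vs.getD c.1 0 + c.2))
    values
  (traits, values.map (fun v => max 0 (min 100 v)))

-- ===== PRECONDITION & SPEC =====
def Spec_adjust_trait_values (responses : List (String × String)) (out : List String × List Int) : Prop := out = adjust_trait_values_alt responses
instance (responses : List (String × String)) (out : List String × List Int) : Decidable (Spec_adjust_trait_values responses out) := by unfold Spec_adjust_trait_values; infer_instance

-- ===== CLAIM (what is proved, stated in full; the proofs are below) =====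
def Claim_equal_adjust_trait_values : Prop := ∀ (responses : List (String × String)), Dom_adjust_trait_values responses → Spec_adjust_trait_values responses (adjust_trait_values responses)

-- ===== LEMMAS AND PROOFS =====

-- contribution of one response to trait t
def pvCt (t : Nat) (k v : String) : Int :=
  match pvContribution k v with
  | some (i, d) => if i = t then d else 0
  | none => 0

-- total contribution of a list of responses to trait t
def pvDsum (t : Nat) : List (String × String) → Int
  | [] => 0
  | p :: l => pvCt t p.1 p.2 + pvDsum t l

-- A's per-question adjustments as functions of the looked-up answer
def pvAQ1 (o : Option String) : Int := if o = some "no" then -10 else 0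
def pvAQ2 (o : Option String) : Int := if o ∈ [some "family", some "money", some "friends"] then -10 else 0
def pvAFull (o : Option String) : Int :=
  if o ∈ [some "very_low"] then -20 else if o ∈ [some "low"] then -10
  else if o ∈ [some "high"] then 10 else if o ∈ [some "very_high"] then 20 else 0
def pvARed (o : Option String) : Int :=
  if o ∈ [some "high"] then 10 else if o ∈ [some "very_high"] then 20 else 0

-- A's total adjustment of trait t, as a function of the lookup
def pvD (t : Nat) (g : String → Option String) : Int :=
  match t with
  | 0 => pvAQ1 (g "q1") + pvAQ2 (g "q2") + pvAFull (g "q8") + pvAFull (g "q9")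
  | 1 => pvAFull (g "q3") + pvAFull (g "q7")
  | 2 => pvAFull (g "q4") + pvAFull (g "q5") + pvAFull (g "q6")
  | 3 => pvAFull (g "q10") + pvAFull (g "q11")
  | 4 => pvARed (g "q12") + pvARed (g "q13")
  | _ => 0

theorem ladder_q1 (o : Option String) (x : Int) :
    (if o = some "no" then x - 10 else x) = x + pvAQ1 o := by
  unfold pvAQ1; split_ifs <;> ring

theorem ladder_q2 (o : Option String) (x : Int) :
    (if o ∈ [some "family", some "money", some "friends"] then x - 10 else x) = x + pvAQ2 o := by
  unfold pvAQ2; split_ifs <;> ring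

theorem ladder_full (o : Option String) (x : Int) :
    (if o ∈ [some "very_low"] then x - 20
     else if o ∈ [some "low"] then x - 10
     else if o ∈ [some "high"] then x + 10
     else if o ∈ [some "very_high"] then x + 20 else x) = x + pvAFull o := by
  unfold pvAFull; split_ifs <;> ring

theorem ladder_red (o : Option String) (x : Int) :
    (if o ∈ [some "high"] then x + 10
     else if o ∈ [some "very_high"] then x + 20 else x) = x + pvARed o := by
  unfold pvARed; split_ifs <;> ring

-- SCORE.get(value, 0) equals A's full four-rung ladder score
theorem score_full (v : String) : pvScoreT.getD v 0 = pvAFull (some v) := by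
  by_cases h1 : v = "very_low" <;> by_cases h2 : v = "low" <;>
    by_cases h3 : v = "high" <;> by_cases h4 : v = "very_high" <;>
    simp_all [pvScoreT, pvAFull, PySem.Dict.getD, PySem.Dict.get?, ne_comm]

-- the zeroed (Neuroticism) score equals A's reduced ladder score
theorem score_red (v : String) :
    (if pvScoreT.getD v 0 < 0 then 0 else pvScoreT.getD v 0) = pvARed (some v) := by
  by_cases h1 : v = "very_low" <;> by_cases h2 : v = "low" <;>
    by_cases h3 : v = "high" <;> by_cases h4 : v = "very_high" <;>
    simp_all [pvScoreT, pvARed, PySem.Dict.getD, PySem.Dict.get?, ne_comm]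

theorem pvContribution_idx_lt (k v : String) (i : Nat) (d : Int)
    (h : pvContribution k v = some (i, d)) : i < 5 := by
  unfold pvContribution at h
  split_ifs at h <;> try simp_all
  · omega
  · omega
  · revert h
    cases hg : pvTrait.get? k with
    | none => simp
    | some idx =>
      intro h
      simp only [Option.some.injEq, Prod.mk.injEq] at h
      obtain ⟨rfl, -⟩ := h
      have hm := PySem.Dict.mem_items_of_get?_eq_some _ hg
      simp [pvTrait] at hm
      rcases hm with ⟨-,rfl⟩|⟨-,rfl⟩|⟨-,rfl⟩|⟨-,rfl⟩|⟨-,rfl⟩|⟨-,rfl⟩|⟨-,rfl⟩|⟨-,rfl⟩|⟨-,rfl⟩|⟨-,rfl⟩|⟨-,rfl⟩ <;> omega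

-- one step of B's loop on a five-slot value list adds the per-trait contributions
theorem step_eq (k v : String) (v0 v1 v2 v3 v4 : Int) :
    (match pvContribution k v with
     | none => [v0, v1, v2, v3, v4]
     | some c => [v0, v1, v2, v3, v4].set c.1 ([v0, v1, v2, v3, v4].getD c.1 0 + c.2)) =
    [v0 + pvCt 0 k v, v1 + pvCt 1 k v, v2 + pvCt 2 k v, v3 + pvCt 3 k v, v4 + pvCt 4 k v] := by
  cases h : pvContribution k v with
  | none => simp [pvCt, h]
  | some c =>
    obtain ⟨i, d⟩ := c
    have hi := pvContribution_idx_lt k v i d h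
    simp only [pvCt, h]
    interval_cases i <;> simp [List.getD]

-- B's whole loop adds the per-trait totals
theorem fold_eq (it : List (String × String)) (v0 v1 v2 v3 v4 : Int) :
    (it.foldl
      (fun vs p =>
        match pvContribution p.1 p.2 with
        | none => vs
        | some c => vs.set c.1 (vs.getD c.1 0 + c.2))
      [v0, v1, v2, v3, v4]) =
    [v0 + pvDsum 0 it, v1 + pvDsum 1 it, v2 + pvDsum 2 it, v3 + pvDsum 3 it, v4 + pvDsum 4 it] := by
  induction it generalizing v0 v1 v2 v3 v4 with
  | nil => simp [pvDsum]
  | cons p tl ih =>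
    rw [List.foldl_cons, step_eq p.1 p.2, ih]
    simp [pvDsum]; and_intros <;> ring

-- keys emitted by pvItemsGo are duplicate-free and avoid `seen`
theorem pvItemsGo_nodup (l : List (String × String)) :
    ∀ seen : List String, ((pvItemsGo l seen).map Prod.fst).Nodup ∧
      ∀ k ∈ (pvItemsGo l seen).map Prod.fst, k ∉ seen := by
  induction l with
  | nil => intro seen; simp [pvItemsGo]
  | cons p t ih =>
    intro seen
    by_cases hp : p.1 ∈ seen
    · simpa [pvItemsGo, hp] using ih seen
    · obtain ⟨hnd, hav⟩ := ih (p.1 :: seen)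
      refine ⟨?_, ?_⟩
      · simp only [pvItemsGo, if_neg hp, List.map_cons, List.nodup_cons]
        exact ⟨fun hmem => (hav _ hmem) (List.mem_cons_self), hnd⟩
      · intro k hk
        simp only [pvItemsGo, if_neg hp, List.map_cons, List.mem_cons] at hk
        rcases hk with rfl | hk
        · exact hp
        · exact fun hs => (hav k hk) (List.mem_cons_of_mem _ hs)

theorem pvItems_nodup (l : List (String × String)) : ((pvItems l).map Prod.fst).Nodup :=
  (pvItemsGo_nodup l []).1

-- first-match lookup is unchanged by the items dedup
theorem get?_pvItemsGo (l : List (String × String)) :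
    ∀ (seen : List String) (q : String),
      (PySem.Dict.mk (pvItemsGo l seen)).get? q =
        if q ∈ seen then none else (PySem.Dict.mk l).get? q := by
  induction l with
  | nil => intro seen q; simp [pvItemsGo]; intro h; rfl
  | cons p t ih =>
    intro seen q
    by_cases hp : p.1 ∈ seen
    · rw [pvItemsGo, if_pos hp, ih, PySem.Dict.get?_mk_cons]
      by_cases hq : q ∈ seen
      · simp [hq]
      · have hne : ¬ (p.1 == q) = true := by
          simp only [beq_iff_eq]; rintro rfl; exact hq hp
        simp [hq, hne]
    · rw [pvItemsGo, if_neg hp, PySem.Dict.get?_mk_cons, ih, PySem.Dict.get?_mk_cons]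
      by_cases hpq : (p.1 == q) = true
      · have hqs : ¬ q ∈ seen := by simp only [beq_iff_eq] at hpq; subst hpq; exact hp
        simp [hpq, hqs]
      · have hne : q ≠ p.1 := by rintro rfl; exact hpq (by simp)
        by_cases hq : q ∈ seen <;> simp [hpq, hq, List.mem_cons, hne]

theorem get?_pvItems (l : List (String × String)) (q : String) :
    (PySem.Dict.mk (pvItems l)).get? q = (PySem.Dict.mk l).get? q := by
  rw [pvItems, get?_pvItemsGo]; simp

theorem pvAFull_none : pvAFull none = 0 := rfl
theorem pvARed_none : pvARed none = 0 := rfl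
theorem pvAQ1_none : pvAQ1 none = 0 := rfl
theorem pvAQ2_none : pvAQ2 none = 0 := rfl

-- the crux: on a duplicate-free item list, B's summed contributions are A's lookup adjustments
theorem pvDsum_eq (it : List (String × String)) (h : (it.map Prod.fst).Nodup) (t : Nat) :
    pvDsum t it = pvD t (fun q => (PySem.Dict.mk it).get? q) := by
  induction it generalizing t with
  | nil =>
    rcases t with _ | _ | _ | _ | _ | t <;> simp [pvDsum, pvD, pvAQ1, pvAQ2, pvAFull, pvARed, PySem.Dict.get?]
  | cons p tl ih =>
    obtain ⟨k, v⟩ := p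
    simp only [List.map_cons, List.nodup_cons] at h
    obtain ⟨hk, hnd⟩ := h
    have ihe := fun t => ih hnd t
    have hnone : ∀ q, q = k → (PySem.Dict.mk tl).get? q = none := by
      intro q hq; subst hq
      rw [PySem.Dict.get?_eq_none_iff_not_mem_keys]
      simpa using hk
    show pvCt t k v + pvDsum t tl = _
    rw [ihe]
    rcases Decidable.em (k ∈ (["q1","q2","q3","q4","q5","q6","q7","q8","q9","q10","q11","q12","q13"] : List String)) with hmem | hmem
    · simp only [List.mem_cons, List.not_mem_nil, or_false] at hmem
      rcases hmem with rfl | rfl | rfl | rfl | rfl | rfl | rfl | rfl | rfl | rfl | rfl | rfl | rfl <;>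
        rcases t with _ | _ | _ | _ | _ | t <;>
          simp [pvCt, pvContribution, pvD, pvAQ1, pvAQ2, pvTrait,
                PySem.Dict.get?_mk_cons, hnone _ rfl, score_full, score_red, ← score_full,
                pvAFull_none, pvARed_none, pvAQ1_none, pvAQ2_none] <;>
          (try split_ifs) <;> (try simp) <;> (try ring)
    · simp only [List.mem_cons, List.not_mem_nil, or_false, not_or] at hmem
      obtain ⟨h1, h2, h3, h4, h5, h6, h7, h8, h9, h10, h11, h12, h13⟩ := hmem
      have htr : pvTrait.get? k = none := by
        rw [PySem.Dict.get?_eq_none_iff_not_mem_keys]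
        simp [pvTrait, h3, h4, h5, h6, h7, h8, h9, h10, h11, h12, h13]
      have hct : pvCt t k v = 0 := by
        simp [pvCt, pvContribution, h1, h2, htr]
      rw [hct]
      rcases t with _ | _ | _ | _ | _ | t <;>
        simp [pvD, PySem.Dict.get?_mk_cons, h1, h2, h3, h4, h5, h6, h7, h8, h9, h10, h11, h12, h13]

-- ===== VERDICT (by name: the statement is the Claim_ definition above) =====
theorem adjust_trait_values_spec : Claim_equal_adjust_trait_values := by
  intro responses _
  unfold Spec_adjust_trait_values adjust_trait_values adjust_trait_values_alt
  dsimp only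
  rw [fold_eq]
  have hd := fun t => pvDsum_eq (pvItems responses) (pvItems_nodup responses) t
  simp only [get?_pvItems] at hd
  simp only [hd 0, hd 1, hd 2, hd 3, hd 4]
  simp only [ladder_full]
  simp only [ladder_red]
  simp only [ladder_q1, ladder_q2, pvD]
  refine Prod.ext rfl ?_
  simp only [List.map]
  congr 1 <;> ring
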